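-- pv_equiv track=rewrite | github.com/AndreaStudy/PythonAlgo | programmers/귤고르기/sol.py | solution
-- ===== SOURCE A (Python) =====
-- from collections import Counter
--
-- def solution(k, tangerine):
--   answer = 0
--   t_cnt = Counter(tangerine)
--   s_t_cnt = sorted(t_cnt.items(), key=lambda x: x[1], reverse=True)
--   for i in s_t_cnt:
--     if k - i[1] <= 0:
--       answer += 1
--       break
--     else:
--       k -= i[1]
--       answer += 1
--
--   return answer
-- ===== SOURCE B (Python) =====
-- from collections import Counter
--
-- def solution(k, tangerine):
--     cnt = Counter(tangerine)                 # type -> how many tangerines of that size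
--     freq = Counter(cnt.values())             # f -> number of distinct types with count exactly f
--     maxf = max(freq) if freq else 0
--     answer = 0
--     for f in range(maxf, 0, -1):             # counting pass over frequency buckets, no comparison sort
--         for _ in range(freq[f]):
--             answer += 1
--             if k - f <= 0:
--                 return answer
--             k -= f
--     return answer
-- ===== Notes on version B (the rewrite author's own statement) =====
-- stated objective: alternative
-- what changed: Replaces the comparison sort of (type,count) items by a counting pass: a Counter over the per-type counts gives frequency buckets that are walked from the maximum frequency down, running the same one-type-at-a-time greedy without ever sorting.
import Mathlib
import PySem

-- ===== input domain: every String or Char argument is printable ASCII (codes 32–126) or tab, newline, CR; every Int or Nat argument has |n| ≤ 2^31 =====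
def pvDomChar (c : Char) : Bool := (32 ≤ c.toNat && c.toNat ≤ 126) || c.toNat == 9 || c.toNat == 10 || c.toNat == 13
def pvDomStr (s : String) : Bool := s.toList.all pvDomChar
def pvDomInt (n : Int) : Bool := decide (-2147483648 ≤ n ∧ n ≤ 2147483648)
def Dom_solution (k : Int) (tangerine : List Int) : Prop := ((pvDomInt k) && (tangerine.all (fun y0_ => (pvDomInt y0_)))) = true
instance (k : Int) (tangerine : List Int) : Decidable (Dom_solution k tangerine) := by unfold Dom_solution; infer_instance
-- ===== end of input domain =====

-- B replaces A's comparison sort of (type, count) items by a counting pass over frequency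
-- buckets walked from the maximum frequency down; same greedy, no sort (alternative, not faster).


-- ===== PORT A =====
-- 'for i in s_t_cnt: …' with break: k and answer are the loop state
def solutionLoop : Int → Int → List (Int × Int) → Int
  | _, answer, [] => answer
  | k, answer, i :: rest =>
      if k - i.2 ≤ 0 then answer + 1
      else solutionLoop (k - i.2) (answer + 1) rest

def solution (k : Int) (tangerine : List Int) : Int :=
  let t_cnt := PySem.Dict.counter tangerine
  let s_t_cnt := PySem.List.sorted t_cnt.items (fun x => x.2) true
  solutionLoop k 0 s_t_cnt

-- ===== PORT B =====
-- inner 'for _ in range(freq[f])': Sum.inl (k, answer) = loop falls through, Sum.inr answer = 'return answer'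
def altInner (f : Int) : Nat → Int → Int → (Int × Int) ⊕ Int
  | 0, k, answer => Sum.inl (k, answer)
  | n + 1, k, answer =>
      if k - f ≤ 0 then Sum.inr (answer + 1)
      else altInner f n (k - f) (answer + 1)

-- outer 'for f in range(maxf, 0, -1)'
def altOuter (freq : PySem.Dict Int Int) : List Int → Int → Int → Int
  | [], _, answer => answer
  | f :: fs, k, answer =>
      match altInner f (freq.getD f 0).toNat k answer with
      | Sum.inl (k', a') => altOuter freq fs k' a'
      | Sum.inr r => r

def solution_alt (k : Int) (tangerine : List Int) : Int :=
  let cnt := PySem.Dict.counter tangerine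
  let freq := PySem.Dict.counter cnt.values
  let maxf := match PySem.List.max? freq.keys (fun x => x) with
              | some m => m
              | none => 0
  altOuter freq (PySem.List.pyRange maxf 0 (-1)) k 0

-- ===== PRECONDITION & SPEC =====
def Spec_solution (k : Int) (tangerine : List Int) (out : Int) : Prop := out = solution_alt k tangerine
instance (k : Int) (tangerine : List Int) (out : Int) : Decidable (Spec_solution k tangerine out) := by unfold Spec_solution; infer_instance

-- ===== CLAIM (what is proved, stated in full; the proofs are below) =====
def Claim_equal_solution : Prop := ∀ (k : Int) (tangerine : List Int), Dom_solution k tangerine → Spec_solution k tangerine (solution k tangerine)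

-- ===== LEMMAS AND PROOFS =====

-- the greedy consumption both loops perform, on a bare list of counts
def greedy : Int → Int → List Int → Int
  | _, answer, [] => answer
  | k, answer, c :: cs =>
      if k - c ≤ 0 then answer + 1
      else greedy (k - c) (answer + 1) cs

theorem solutionLoop_eq_greedy (l : List (Int × Int)) (k a : Int) :
    solutionLoop k a l = greedy k a (l.map (·.2)) := by
  induction l generalizing k a with
  | nil => rfl
  | cons i rest ih =>
      simp only [solutionLoop, greedy, List.map]
      split_ifs <;> simp [ih]

theorem altInner_greedy (f : Int) (n : Nat) (k a : Int) (cs : List Int) :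
    (match altInner f n k a with
     | Sum.inl (k', a') => greedy k' a' cs
     | Sum.inr r => r) = greedy k a (List.replicate n f ++ cs) := by
  induction n generalizing k a with
  | zero => rfl
  | succ n ih =>
      simp only [altInner, List.replicate, List.cons_append, greedy]
      split_ifs with h
      · rfl
      · exact ih (k - f) (a + 1)

theorem altOuter_eq_greedy (freq : PySem.Dict Int Int) (fs : List Int) (k a : Int) :
    altOuter freq fs k a
      = greedy k a (fs.flatMap (fun f => List.replicate (freq.getD f 0).toNat f)) := by
  induction fs generalizing k a with
  | nil => rfl
  | cons f fs ih =>
      simp only [altOuter, List.flatMap_cons]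
      rw [← altInner_greedy f (freq.getD f 0).toNat k a]
      cases h : altInner f (freq.getD f 0).toNat k a with
      | inl p => cases p with | mk k' a' => simp [ih]
      | inr r => simp

theorem pairwise_gt_pyRange_neg_one (a b : Int) :
    List.Pairwise (fun x y => y < x) (PySem.List.pyRange a b (-1)) := by
  rw [PySem.List.pyRange_neg_one]
  exact List.pairwise_lt_range.map _ (fun i j h => by omega)

theorem count_flatMap_replicate (m : Int → Nat) (v : Int) (fs : List Int)
    (hnd : fs.Nodup) :
    (fs.flatMap (fun f => List.replicate (m f) f)).count v
      = if v ∈ fs then m v else 0 := by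
  induction fs with
  | nil => simp
  | cons f fs ih =>
      simp only [List.flatMap_cons, List.count_append, List.count_replicate,
        List.mem_cons]
      rcases List.nodup_cons.mp hnd with ⟨hf, hnd'⟩
      by_cases hv : v = f
      · subst hv
        simp [ih hnd', hf]
      · simp [Ne.symm hv, hv, ih hnd']


theorem mem_values_counter_pos (tangerine : List Int) (v : Int)
    (hv : v ∈ (PySem.Dict.counter tangerine).values) : 1 ≤ v := by
  have : (PySem.Dict.counter tangerine).values
      = (PySem.Dict.counter tangerine).items.map (·.2) := rfl
  rw [this, PySem.Dict.items_counter] at hv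
  simp only [List.map_map, List.mem_map, Function.comp] at hv
  obtain ⟨x, hx, hxv⟩ := hv
  rw [PySem.Set.mem_ofList] at hx
  have : 1 ≤ tangerine.count x := List.one_le_count_iff.mpr hx
  omega

theorem main_list_eq (tangerine : List Int) (maxf : Int)
    (hmax : PySem.List.max? (PySem.Dict.counter (PySem.Dict.counter tangerine).values).keys
      (fun x => x) = some maxf) :
    ((PySem.List.sorted (PySem.Dict.counter tangerine).items (fun x => x.2) true).map (·.2))
      = (PySem.List.pyRange maxf 0 (-1)).flatMap
          (fun f => List.replicate ((PySem.Dict.counter tangerine).values.count f) f) := by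
  set vs := (PySem.Dict.counter tangerine).values with hvs
  set L1 := ((PySem.List.sorted (PySem.Dict.counter tangerine).items (fun x => x.2) true).map (·.2)) with hL1
  set L2 := (PySem.List.pyRange maxf 0 (-1)).flatMap (fun f => List.replicate (vs.count f) f) with hL2
  have hub : ∀ v ∈ vs, v ≤ maxf := by
    intro v hv
    have hk : v ∈ (PySem.Dict.counter vs).keys := by
      rw [PySem.Dict.keys_counter, PySem.Set.mem_ofList]; exact hv
    exact PySem.List.max?_isMax hmax v hk
  have hlb : ∀ v ∈ vs, 1 ≤ v := fun v hv => mem_values_counter_pos tangerine v hv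
  have hnd : (PySem.List.pyRange maxf 0 (-1)).Nodup :=
    (pairwise_gt_pyRange_neg_one maxf 0).imp (fun h => (ne_of_lt h).symm)
  have hperm1 : L1.Perm vs := by
    have := (PySem.List.sorted_perm (PySem.Dict.counter tangerine).items (fun x => x.2) true).map (·.2)
    exact this
  have hperm2 : L2.Perm vs := by
    rw [List.perm_iff_count]
    intro v
    rw [hL2, count_flatMap_replicate (fun f => vs.count f) v _ hnd]
    by_cases hm : v ∈ PySem.List.pyRange maxf 0 (-1)
    · simp [hm]
    · simp only [hm, if_false]
      by_cases hvv : v ∈ vs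
      · exact absurd (PySem.List.mem_pyRange_neg_one.mpr ⟨by have := hlb v hvv; omega,
          hub v hvv⟩) hm
      · exact (List.count_eq_zero.mpr hvv).symm
  have hp1 : List.Pairwise (fun a b => -a ≤ -b) L1 := by
    rw [hL1]
    exact (PySem.List.sorted_pairwise_rev (PySem.Dict.counter tangerine).items (fun x => x.2)).map
      _ (fun a b h => by omega)
  have hp2 : List.Pairwise (fun a b => -a ≤ -b) L2 := by
    rw [hL2, List.pairwise_flatMap]
    constructor
    · intro f _
      rw [List.pairwise_replicate]
      right; omega
    · exact (pairwise_gt_pyRange_neg_one maxf 0).imp (by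
        intro f1 f2 h x hx y hy
        rw [List.eq_of_mem_replicate hx, List.eq_of_mem_replicate hy]
        omega)
  exact PySem.List.eq_of_perm_of_pairwise_le_of_injective (fun x : Int => -x)
    neg_injective (hperm1.trans hperm2.symm) hp1 hp2

theorem solution_eq_alt (k : Int) (tangerine : List Int) :
    solution k tangerine = solution_alt k tangerine := by
  rw [solution, solution_alt]
  simp only [solutionLoop_eq_greedy, altOuter_eq_greedy, PySem.Dict.getD_counter,
    Int.toNat_natCast]
  cases hmax : PySem.List.max? (PySem.Dict.counter (PySem.Dict.counter tangerine).values).keys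
      (fun x => x) with
  | none =>
      have hkeys := (PySem.List.max?_eq_none_iff _ _).mp hmax
      rw [PySem.Dict.keys_counter] at hkeys
      have hvs : (PySem.Dict.counter tangerine).values = [] := by
        cases h : (PySem.Dict.counter tangerine).values with
        | nil => rfl
        | cons a t =>
            exfalso
            have ha : a ∈ PySem.Set.ofList (PySem.Dict.counter tangerine).values := by
              rw [PySem.Set.mem_ofList, h]; exact List.mem_cons_self
            rw [hkeys] at ha
            exact absurd ha (List.not_mem_nil)
      have hitems : (PySem.Dict.counter tangerine).items = [] := by
        have : (PySem.Dict.counter tangerine).values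
            = (PySem.Dict.counter tangerine).items.map (·.2) := rfl
        rw [this] at hvs
        exact List.map_eq_nil_iff.mp hvs
      rw [hitems]
      rfl
  | some m =>
      rw [main_list_eq tangerine m hmax]

-- ===== VERDICT (by name: the statement is the Claim_ definition above) =====
theorem solution_spec : Claim_equal_solution := by
  intro k tangerine _
  unfold Spec_solution
  exact solution_eq_alt k tangerine
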